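-- pv_equiv track=rewrite | github.com/RemyInstefjordUthaug/INF225-Project | file_1.py | isCompList
-- ===== SOURCE A (Python) =====
-- def isCompList(l, v):
--     if isList(l) and isList(v):
--         while isList(l) and isList(v):
--             l = l[:-2]
--             v = v[:-2]
--         if v == "Void":
--             return True
--         elif checkType(l, v): return True
--     return False
--
-- def isCompTuple(l, r):
--     if isTuple(l) and isTuple(r):
--         l = l[1:][:-1]
--         r = r[1:][:-1]
--         listl = l.split(";")
--         listr = r.split(";")
--         if len(listl) == len(listr):
--             for i in range(len(listl)):
--                 if not checkType(listl[i], listr[i]): return False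
--             return True
--     return False
--
-- def checkType(l,r):
--     if l==r: return True
--     if r=="Void": return True
--     if isCompList(l,r): return True
--     elif isCompTuple(l,r): return True
--     else: return False
--
-- def isList(l):
--     if (len(l) > 2 and l[-2:] == "[]"): return True
--     else: return False
--
-- def isTuple(t):
--     if (len(t) > 1 and t[0] == "(" and t[-1] == ")"): return True
--     else: return False
-- ===== SOURCE B (Python) =====
-- # B: computes each side's list depth arithmetically and strips min(depths)
-- # levels with one slice instead of A's lockstep while loop; tuple elements are
-- # checked by a two-list walk instead of an indexed loop. Objective: alternative.
-- def isCompList(l, v):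
--     k = min(depth(l), depth(v))
--     if k == 0:
--         return False
--     l2 = l[:len(l) - 2 * k]
--     v2 = v[:len(v) - 2 * k]
--     return v2 == "Void" or checkType(l2, v2)
--
-- def depth(s):
--     n = len(s)
--     d = 0
--     while n - 2 * d > 2 and s[n - 2 * d - 2 : n - 2 * d] == "[]":
--         d += 1
--     return d
--
-- def checkType(l, r):
--     return l == r or r == "Void" or isCompList(l, r) or isCompTuple(l, r)
--
-- def isCompTuple(l, r):
--     return (isTuple(l) and isTuple(r)
--             and allPairs(l[1:-1].split(";"), r[1:-1].split(";")))
--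
-- def allPairs(xs, ys):
--     while True:
--         if not xs:
--             return not ys
--         if not ys:
--             return False
--         if not checkType(xs[0], ys[0]):
--             return False
--         xs = xs[1:]
--         ys = ys[1:]
--
-- def isTuple(t):
--     return len(t) > 1 and t.startswith("(") and t.endswith(")")
-- ===== Notes on version B (the rewrite author's own statement) =====
-- stated objective: alternative
-- what changed: A strips '[]' suffixes from both strings in a lockstep while loop; B instead computes each side's list depth arithmetically by scanning indices, strips min(depths) levels with a single slice, and replaces the length-check-plus-indexed tuple loop by a two-list walk.
import Mathlib
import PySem

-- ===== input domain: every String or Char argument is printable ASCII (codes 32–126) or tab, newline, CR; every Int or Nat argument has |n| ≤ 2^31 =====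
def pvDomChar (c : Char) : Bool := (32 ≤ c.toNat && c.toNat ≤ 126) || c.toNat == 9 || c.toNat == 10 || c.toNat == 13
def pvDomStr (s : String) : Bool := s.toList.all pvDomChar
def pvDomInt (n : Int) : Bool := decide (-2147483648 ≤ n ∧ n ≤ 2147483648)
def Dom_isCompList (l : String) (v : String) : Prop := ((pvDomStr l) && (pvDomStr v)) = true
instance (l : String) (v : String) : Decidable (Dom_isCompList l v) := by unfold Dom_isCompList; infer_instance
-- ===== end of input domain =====

-- B computes each side's list depth arithmetically and strips min(depths) levels with one
-- slice instead of A's lockstep while loop; tuple elements are checked by a two-list walk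
-- instead of an indexed loop (objective: alternative).

def VoidC : List Char := ['V', 'o', 'i', 'd']

-- ===== PORT A =====
-- isList(l): len(l) > 2 and l[-2:] == "[]"
def isListC (l : List Char) : Bool :=
  decide (2 < l.length) && (PySem.Chars.slice l (some (-2)) none == ['[', ']'])

-- isTuple(t): len(t) > 1 and t[0] == "(" and t[-1] == ")"
def isTupleC (t : List Char) : Bool :=
  decide (1 < t.length) && (PySem.Chars.pyGet? t 0 == some '(') && (PySem.Chars.pyGet? t (-1) == some ')')

-- facts the ports need for termination (cited in decreasing_by)
theorem isListC_length {l : List Char} (h : isListC l = true) : 2 < l.length := by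
  unfold isListC at h
  simp only [Bool.and_eq_true, decide_eq_true_eq] at h
  exact h.1

theorem isTupleC_length {t : List Char} (h : isTupleC t = true) : 1 < t.length := by
  unfold isTupleC at h
  simp only [Bool.and_eq_true, decide_eq_true_eq] at h
  exact h.1.1

theorem go_zero (sep l cur : List Char) (acc : List (List Char)) :
    PySem.Chars.splitOn.go sep 0 l cur acc = ((cur.reverse ++ l) :: acc).reverse := by
  rw [PySem.Chars.splitOn.go]

theorem go_succ_nil (sep cur : List Char) (fuel : Nat) (acc : List (List Char)) :
    PySem.Chars.splitOn.go sep (fuel+1) [] cur acc = (cur.reverse :: acc).reverse := by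
  rw [PySem.Chars.splitOn.go]
  omega

theorem go_succ_cons (sep cur : List Char) (fuel : Nat) (c : Char) (rest : List Char)
    (acc : List (List Char)) :
    PySem.Chars.splitOn.go sep (fuel+1) (c :: rest) cur acc =
      if sep.isPrefixOf (c :: rest) then
        PySem.Chars.splitOn.go sep fuel (List.drop sep.length (c :: rest)) [] (cur.reverse :: acc)
      else PySem.Chars.splitOn.go sep fuel rest (c :: cur) acc := by
  rw [PySem.Chars.splitOn.go]

theorem splitOn_go_mem (sep : List Char) (fuel : Nat) :
    ∀ (l cur : List Char) (acc : List (List Char)) (p : List Char),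
      p ∈ PySem.Chars.splitOn.go sep fuel l cur acc → p ∈ acc ∨ p.length ≤ cur.length + l.length := by
  induction fuel with
  | zero =>
    intro l cur acc p hp
    rw [go_zero] at hp
    simp only [List.mem_reverse, List.mem_cons] at hp
    rcases hp with h | h
    · right; subst h; simp
    · left; exact h
  | succ fuel ih =>
    intro l cur acc p hp
    match l with
    | [] =>
      rw [go_succ_nil] at hp
      simp only [List.mem_reverse, List.mem_cons] at hp
      rcases hp with h | h
      · right; subst h; simp
      · left; exact h
    | c :: rest =>
      rw [go_succ_cons] at hp
      split at hp
      · rcases ih _ _ _ _ hp with h | h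
        · rcases List.mem_cons.mp h with h' | h'
          · right; subst h'; simp
          · left; exact h'
        · right
          have hlen : (List.drop sep.length (c :: rest)).length ≤ (c :: rest).length := by
            simp [List.length_drop]
          simp only [List.length_nil, Nat.zero_add] at h
          omega
      · rcases ih _ _ _ _ hp with h | h
        · left; exact h
        · right; simp only [List.length_cons] at h ⊢; omega

theorem mem_splitOn_length {s sep p : List Char} (hp : p ∈ PySem.Chars.splitOn s sep) :
    p.length ≤ s.length := by
  unfold PySem.Chars.splitOn at hp
  rcases splitOn_go_mem sep _ s [] [] p hp with h | h
  · simp at h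
  · simpa using h

theorem inner_length (l : List Char) :
    (PySem.Chars.slice (PySem.Chars.slice l (some 1) none) none (some (-1))).length =
      l.length - 1 - 1 := by
  simp only [PySem.Chars.slice_eq_listSlice, PySem.List.slice_from_one,
    PySem.List.slice_to_neg_one, List.length_dropLast, List.length_tail]

theorem slice2_sum_lt {l v : List Char} (h1 : 2 < l.length) (h2 : 2 < v.length) :
    (PySem.Chars.slice l none (some (-2))).length +
      (PySem.Chars.slice v none (some (-2))).length < l.length + v.length := by
  simp only [PySem.Chars.slice_eq_listSlice,
    PySem.List.slice_to_neg_ofNat _ 2 (by norm_num), List.length_take]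
  omega

theorem dec_strip {l v : List Char} (h : (isListC l && isListC v) = true) :
    (PySem.Chars.slice l none (some (-2))).length +
      (PySem.Chars.slice v none (some (-2))).length < l.length + v.length := by
  simp only [Bool.and_eq_true] at h
  exact slice2_sum_lt (isListC_length h.1) (isListC_length h.2)

-- the while loop inside A's isCompList
def stripA (l : List Char) (v : List Char) : List Char × List Char :=
  if isListC l && isListC v then
    stripA (PySem.Chars.slice l none (some (-2))) (PySem.Chars.slice v none (some (-2)))
  else (l, v)
termination_by l.length + v.length
decreasing_by exact dec_strip (by assumption)

theorem stripA_le (l v : List Char) :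
    (stripA l v).1.length ≤ l.length ∧ (stripA l v).2.length ≤ v.length := by
  induction l, v using stripA.induct with
  | case1 l v h ih =>
    rw [stripA, if_pos h]
    have hl : (PySem.Chars.slice l none (some (-2))).length ≤ l.length := by
      simp only [PySem.Chars.slice_eq_listSlice,
        PySem.List.slice_to_neg_ofNat _ 2 (by norm_num), List.length_take]
      omega
    have hv : (PySem.Chars.slice v none (some (-2))).length ≤ v.length := by
      simp only [PySem.Chars.slice_eq_listSlice,
        PySem.List.slice_to_neg_ofNat _ 2 (by norm_num), List.length_take]
      omega
    exact ⟨ih.1.trans hl, ih.2.trans hv⟩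
  | case2 l v h => rw [stripA, if_neg h]; exact ⟨le_rfl, le_rfl⟩

theorem dec_listA {l v : List Char} (h : (isListC l && isListC v) = true) :
    (stripA l v).1.length + (stripA l v).2.length < l.length + v.length := by
  simp only [Bool.and_eq_true] at h
  have hs := stripA_le (PySem.Chars.slice l none (some (-2))) (PySem.Chars.slice v none (some (-2)))
  have hlt := slice2_sum_lt (isListC_length h.1) (isListC_length h.2)
  rw [stripA, if_pos (by simp [h.1, h.2])]
  omega

theorem dec_tuple {l r a b : List Char} (h : (isTupleC l && isTupleC r) = true)
    (ha : a ∈ PySem.Chars.splitOn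
      (PySem.Chars.slice (PySem.Chars.slice l (some 1) none) none (some (-1))) [';'])
    (hb : b ∈ PySem.Chars.splitOn
      (PySem.Chars.slice (PySem.Chars.slice r (some 1) none) none (some (-1))) [';']) :
    a.length + b.length < l.length + r.length := by
  simp only [Bool.and_eq_true] at h
  have h1 := isTupleC_length h.1
  have h2 := isTupleC_length h.2
  have la := mem_splitOn_length ha
  have lb := mem_splitOn_length hb
  rw [inner_length] at la lb
  omega

mutual
def isCompListA (l : List Char) (v : List Char) : Bool :=
  if h : isListC l && isListC v then
    let p := stripA l v
    if p.2 == VoidC then true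
    else if checkTypeA p.1 p.2 then true
    else false
  else false
termination_by (l.length + v.length, 0)
decreasing_by exact Prod.Lex.left _ _ (dec_listA h)

def isCompTupleA (l : List Char) (r : List Char) : Bool :=
  if h : isTupleC l && isTupleC r then
    let l1 := PySem.Chars.slice (PySem.Chars.slice l (some 1) none) none (some (-1))
    let r1 := PySem.Chars.slice (PySem.Chars.slice r (some 1) none) none (some (-1))
    let listl := PySem.Chars.splitOn l1 [';']
    let listr := PySem.Chars.splitOn r1 [';']
    if listl.length == listr.length then
      ((listl.zip listr).attach.all fun p => checkTypeA p.1.1 p.1.2)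
    else false
  else false
termination_by (l.length + r.length, 0)
decreasing_by
  obtain ⟨⟨a, b⟩, hmem⟩ := p
  obtain ⟨ha, hb⟩ := List.of_mem_zip hmem
  exact Prod.Lex.left _ _ (dec_tuple h ha hb)

def checkTypeA (l : List Char) (r : List Char) : Bool :=
  if l == r then true
  else if r == VoidC then true
  else if isCompListA l r then true
  else if isCompTupleA l r then true
  else false
termination_by (l.length + r.length, 2)
decreasing_by all_goals exact Prod.Lex.right _ (Nat.lt_of_sub_eq_succ rfl)
end

def isCompList (l : String) (v : String) : Bool := isCompListA l.toList v.toList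

-- ===== PORT B =====
-- isTuple(t): len(t) > 1 and t.startswith("(") and t.endswith(")")
def isTupleB (t : List Char) : Bool :=
  decide (1 < t.length) && PySem.Chars.startswith t ['('] && PySem.Chars.endswith t [')']

-- depth(s): the while loop counting trailing "[]" pairs by index arithmetic
def depthGo (s : List Char) (n : Nat) (d : Nat) : Nat :=
  if 2 * d + 2 < n ∧
      PySem.Chars.slice s (some ((n : Int) - 2 * d - 2)) (some ((n : Int) - 2 * d)) = ['[', ']'] then
    depthGo s n (d + 1)
  else d
termination_by n - 2 * d

def depthB (s : List Char) : Nat := depthGo s s.length 0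

-- measure for the two-list walk, used only for termination of the mutual block
def sumM (xs : List (List Char)) : Nat := (xs.map (fun p => p.length + 1)).sum

theorem sumM_cons (x : List Char) (xs : List (List Char)) :
    sumM (x :: xs) = x.length + 1 + sumM xs := by
  simp [sumM]

theorem sumM_reverse (xs : List (List Char)) : sumM xs.reverse = sumM xs := by
  simp [sumM]

theorem splitOn_go_sumM (sep : List Char) (hsep : 1 ≤ sep.length) (fuel : Nat) :
    ∀ (l cur : List Char) (acc : List (List Char)),
      sumM (PySem.Chars.splitOn.go sep fuel l cur acc) ≤
        sumM acc + cur.length + l.length + 1 := by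
  induction fuel with
  | zero =>
    intro l cur acc
    rw [go_zero, sumM_reverse, sumM_cons]
    simp only [List.length_append, List.length_reverse]
    omega
  | succ fuel ih =>
    intro l cur acc
    match l with
    | [] =>
      rw [go_succ_nil, sumM_reverse, sumM_cons]
      simp only [List.length_reverse, List.length_nil]
      omega
    | c :: rest =>
      rw [go_succ_cons]
      split
      · have h := ih (List.drop sep.length (c :: rest)) [] (cur.reverse :: acc)
        rw [sumM_cons] at h
        simp only [List.length_reverse, List.length_nil, List.length_drop,
          List.length_cons] at h ⊢
        omega
      · have h := ih rest (c :: cur) acc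
        simp only [List.length_cons] at h ⊢
        omega

theorem splitOn_sumM (s : List Char) : sumM (PySem.Chars.splitOn s [';']) ≤ s.length + 1 := by
  unfold PySem.Chars.splitOn
  have h := splitOn_go_sumM [';'] (by simp) (s.length + 1) s [] []
  rw [show sumM ([] : List (List Char)) = 0 from rfl] at h
  simp only [List.length_nil] at h
  omega

theorem isTupleB_length {t : List Char} (h : isTupleB t = true) : 1 < t.length := by
  unfold isTupleB at h
  simp only [Bool.and_eq_true, decide_eq_true_eq] at h
  exact h.1.1

theorem innerSlice (l : List Char) :
    PySem.List.slice l (some 1) (some (-1)) = l.tail.dropLast := by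
  simp only [PySem.List.slice]
  match l with
  | [] => rfl
  | c :: rest => simp [List.dropLast_eq_take]

theorem innerB_length (l : List Char) :
    (PySem.Chars.slice l (some 1) (some (-1))).length = l.length - 1 - 1 := by
  simp only [PySem.Chars.slice_eq_listSlice, innerSlice, List.length_dropLast, List.length_tail]

theorem depthGo_le (s : List Char) (n : Nat) :
    ∀ m d, m = n - 2 * d → 2 * d ≤ n → 2 * depthGo s n d ≤ n := by
  intro m
  induction m using Nat.strong_induction_on with
  | _ m IHm =>
    intro d hm hd
    rw [depthGo]
    split
    next h => exact IHm (n - 2 * (d + 1)) (by omega) (d + 1) rfl (by omega)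
    next h => omega

theorem depthB_le (s : List Char) : 2 * depthB s ≤ s.length :=
  depthGo_le s s.length (s.length) 0 (by omega) (by omega)

theorem dec_tupleB {l r : List Char} (h : (isTupleB l && isTupleB r) = true) :
    sumM (PySem.Chars.splitOn (PySem.Chars.slice l (some 1) (some (-1))) [';']) +
      sumM (PySem.Chars.splitOn (PySem.Chars.slice r (some 1) (some (-1))) [';']) <
      l.length + r.length := by
  simp only [Bool.and_eq_true] at h
  have h1 := isTupleB_length h.1
  have h2 := isTupleB_length h.2
  have b1 := splitOn_sumM (PySem.Chars.slice l (some 1) (some (-1)))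
  have b2 := splitOn_sumM (PySem.Chars.slice r (some 1) (some (-1)))
  rw [innerB_length] at b1
  rw [innerB_length] at b2
  omega

theorem dec_listB {l v : List Char} (k : Nat) (hk : k = min (depthB l) (depthB v))
    (hk0 : ¬ k = 0) :
    (PySem.Chars.slice l none (some ((l.length : Int) - 2 * k))).length +
      (PySem.Chars.slice v none (some ((v.length : Int) - 2 * k))).length <
      l.length + v.length := by
  have h1 := depthB_le l
  have h2 := depthB_le v
  have hl : 2 * k ≤ l.length := by omega
  have hv : 2 * k ≤ v.length := by omega
  have el : ((l.length : Int) - 2 * k) = ((l.length - 2 * k : Nat) : Int) := by omega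
  have ev : ((v.length : Int) - 2 * k) = ((v.length - 2 * k : Nat) : Int) := by omega
  rw [el, ev]
  simp only [PySem.Chars.slice_eq_listSlice, PySem.List.slice_to_natCast, List.length_take]
  omega

mutual
-- isCompList(l, v): k = min depths; strip k levels at once; Void or checkType
def isCompListB (l : List Char) (v : List Char) : Bool :=
  if hk0 : min (depthB l) (depthB v) = 0 then false
  else
    (PySem.Chars.slice v none (some ((v.length : Int) - 2 * (min (depthB l) (depthB v)))) == VoidC) ||
      checkTypeB (PySem.Chars.slice l none (some ((l.length : Int) - 2 * (min (depthB l) (depthB v)))))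
        (PySem.Chars.slice v none (some ((v.length : Int) - 2 * (min (depthB l) (depthB v)))))
termination_by (l.length + v.length, 0)
decreasing_by exact Prod.Lex.left _ _ (dec_listB _ rfl hk0)

def checkTypeB (l : List Char) (r : List Char) : Bool :=
  (l == r) || (r == VoidC) || isCompListB l r || isCompTupleB l r
termination_by (l.length + r.length, 2)
decreasing_by
  · exact Prod.Lex.right _ (by omega)
  · exact Prod.Lex.right _ (by omega)

def isCompTupleB (l : List Char) (r : List Char) : Bool :=
  if h : (isTupleB l && isTupleB r) = true then
    allPairsB (PySem.Chars.splitOn (PySem.Chars.slice l (some 1) (some (-1))) [';'])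
      (PySem.Chars.splitOn (PySem.Chars.slice r (some 1) (some (-1))) [';'])
  else false
termination_by (l.length + r.length, 1)
decreasing_by exact Prod.Lex.left _ _ (dec_tupleB h)

-- allPairs(xs, ys): the two-list walk
def allPairsB (xs : List (List Char)) (ys : List (List Char)) : Bool :=
  match xs, ys with
  | [], ys => ys.isEmpty
  | _ :: _, [] => false
  | x :: xs', y :: ys' => checkTypeB x y && allPairsB xs' ys'
termination_by (sumM xs + sumM ys, 0)
decreasing_by
  · exact Prod.Lex.left _ _ (by simp only [sumM_cons]; omega)
  · exact Prod.Lex.left _ _ (by simp only [sumM_cons]; omega)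
end

def isCompList_alt (l : String) (v : String) : Bool := isCompListB l.toList v.toList

-- ===== PRECONDITION & SPEC =====
def Spec_isCompList (l : String) (v : String) (out : Bool) : Prop := out = isCompList_alt l v
instance (l : String) (v : String) (out : Bool) : Decidable (Spec_isCompList l v out) := by unfold Spec_isCompList; infer_instance

-- ===== CLAIM (what is proved, stated in full; the proofs are below) =====
def Claim_equal_isCompList : Prop := ∀ (l : String) (v : String), Dom_isCompList l v → Spec_isCompList l v (isCompList l v)

-- ===== LEMMAS AND PROOFS =====

theorem slice_neg2 (l : List Char) :
    PySem.Chars.slice l none (some (-2)) = l.take (l.length - 2) := by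
  simp only [PySem.Chars.slice_eq_listSlice, PySem.List.slice_to_neg_ofNat _ 2 (by norm_num)]

theorem slice_from_neg2 (l : List Char) :
    PySem.Chars.slice l (some (-2)) none = l.drop (l.length - 2) := by
  simp only [PySem.Chars.slice_eq_listSlice, PySem.List.slice_from_neg_ofNat _ 2 (by norm_num)]

-- the recursive characterisation of the number of strippable "[]" levels
def dRec (s : List Char) : Nat :=
  if h : isListC s = true then dRec (PySem.Chars.slice s none (some (-2))) + 1 else 0
termination_by s.length
decreasing_by
  have := isListC_length h
  rw [slice_neg2]
  simp only [List.length_take]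
  omega

theorem dRec_eq_zero {s : List Char} (h : isListC s = false) : dRec s = 0 := by
  rw [dRec]
  simp [h]

theorem dRec_succ {s : List Char} (h : isListC s = true) :
    dRec s = dRec (s.take (s.length - 2)) + 1 := by
  rw [dRec, dif_pos h, slice_neg2]

theorem dRec_le (s : List Char) : 2 * dRec s ≤ s.length := by
  induction s using dRec.induct with
  | case1 s h ih =>
    have hl := isListC_length h
    rw [dRec, dif_pos h]
    rw [slice_neg2] at ih ⊢
    simp only [List.length_take] at ih
    omega
  | case2 s h =>
    rw [dRec, dif_neg h]
    omega

theorem isListC_take {s : List Char} {m : Nat} (hm : 2 < m) (hms : m ≤ s.length) :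
    isListC (s.take m) = ((s.drop (m - 2)).take 2 == ['[', ']']) := by
  unfold isListC
  rw [slice_from_neg2]
  have hlen : (s.take m).length = m := by rw [List.length_take]; omega
  rw [hlen, List.drop_take]
  have h2 : m - (m - 2) = 2 := by omega
  rw [h2]
  simp [hm]

theorem depthGo_eq (s : List Char) (n : Nat) (hn : n = s.length) :
    ∀ m d, m = n - 2 * d → 2 * d ≤ n → depthGo s n d = d + dRec (s.take (n - 2 * d)) := by
  intro m
  induction m using Nat.strong_induction_on with
  | _ m IHm =>
    intro d hm hd
    rw [depthGo]
    split
    next h =>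
      obtain ⟨h1, h2⟩ := h
      rw [IHm (n - 2 * (d + 1)) (by omega) (d + 1) rfl (by omega)]
      have e1 : ((n : Int) - 2 * d - 2) = ((n - 2 * d - 2 : Nat) : Int) := by omega
      have e2 : ((n : Int) - 2 * d) = ((n - 2 * d : Nat) : Int) := by omega
      rw [e1, e2] at h2
      simp only [PySem.Chars.slice_eq_listSlice, PySem.List.slice_natCast] at h2
      have h3 : n - 2 * d - (n - 2 * d - 2) = 2 := by omega
      rw [h3] at h2
      have hL : isListC (s.take (n - 2 * d)) = true := by
        rw [isListC_take (by omega) (by omega), h2]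
        simp
      rw [dRec_succ hL]
      have hlen : (s.take (n - 2 * d)).length = n - 2 * d := by
        rw [List.length_take]; omega
      rw [hlen, List.take_take]
      have h4 : min (n - 2 * d - 2) (n - 2 * d) = n - 2 * (d + 1) := by omega
      rw [h4]
      omega
    next h =>
      by_cases h1 : 2 * d + 2 < n
      · have h2 : ¬ PySem.Chars.slice s (some ((n : Int) - 2 * d - 2)) (some ((n : Int) - 2 * d)) =
            ['[', ']'] := by
          intro hc; exact h ⟨h1, hc⟩
        have e1 : ((n : Int) - 2 * d - 2) = ((n - 2 * d - 2 : Nat) : Int) := by omega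
        have e2 : ((n : Int) - 2 * d) = ((n - 2 * d : Nat) : Int) := by omega
        rw [e1, e2] at h2
        simp only [PySem.Chars.slice_eq_listSlice, PySem.List.slice_natCast] at h2
        have h3 : n - 2 * d - (n - 2 * d - 2) = 2 := by omega
        rw [h3] at h2
        have hL : isListC (s.take (n - 2 * d)) = false := by
          rw [isListC_take (by omega) (by omega)]
          simpa using h2
        rw [dRec_eq_zero hL]
        omega
      · have hL : isListC (s.take (n - 2 * d)) = false := by
          unfold isListC
          have : (s.take (n - 2 * d)).length ≤ 2 := by
            rw [List.length_take]; omega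
          simp only [Bool.and_eq_false_iff, decide_eq_false_iff_not]
          left; omega
        rw [dRec_eq_zero hL]
        omega

theorem depthB_eq (s : List Char) : depthB s = dRec s := by
  unfold depthB
  rw [depthGo_eq s s.length rfl (s.length) 0 (by omega) (by omega)]
  simp

theorem dRec_ne_zero_iff (s : List Char) : dRec s ≠ 0 ↔ isListC s = true := by
  constructor
  · intro h
    by_contra hc
    exact h (dRec_eq_zero (by simpa using hc))
  · intro h
    rw [dRec_succ h]
    omega

theorem stripA_eq (l v : List Char) :
    stripA l v = (l.take (l.length - 2 * min (dRec l) (dRec v)),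
                  v.take (v.length - 2 * min (dRec l) (dRec v))) := by
  induction l, v using stripA.induct with
  | case1 l v h ih =>
    have hb : isListC l = true ∧ isListC v = true := by simpa using h
    have hl2 := isListC_length hb.1
    have hv2 := isListC_length hb.2
    rw [stripA, if_pos h]
    rw [slice_neg2, slice_neg2] at ih
    rw [slice_neg2, slice_neg2, ih]
    rw [dRec_succ hb.1, dRec_succ hb.2, Nat.succ_min_succ]
    simp only [List.length_take, List.take_take, Prod.mk.injEq]
    constructor <;> (congr 1; omega)
  | case2 l v h =>
    rw [stripA, if_neg h]
    have hmin : min (dRec l) (dRec v) = 0 := by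
      by_cases hl : isListC l = true
      · have hv : isListC v = false := by
          by_contra hc
          exact h (by simp [hl, show isListC v = true by simpa using hc])
        simp [dRec_eq_zero hv]
      · simp [dRec_eq_zero (by simpa using hl)]
    rw [hmin]
    simp

theorem attach_all (ps : List (List Char × List Char)) (f : List Char × List Char → Bool) :
    (ps.attach.all fun p => f p.1) = ps.all f := by
  simp

theorem singleton_prefix (c : Char) (t : List Char) :
    ([c] <+: t) ↔ t.head? = some c := by
  cases t with
  | nil => simp
  | cons a rest => simp [List.cons_prefix_cons, eq_comm]

theorem isTupleB_eq (t : List Char) : isTupleB t = isTupleC t := by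
  unfold isTupleB isTupleC
  by_cases hlen : 1 < t.length
  · have hsw : PySem.Chars.startswith t ['('] = (PySem.Chars.pyGet? t 0 == some '(') := by
      rw [Bool.eq_iff_iff, PySem.Chars.startswith_iff, singleton_prefix]
      simp only [PySem.Chars.pyGet?_eq_listPyGet?, beq_iff_eq]
      rw [show (0 : Int) = ((0 : Nat) : Int) from rfl, PySem.List.pyGet?_natCast]
      cases t <;> simp
    have hew : PySem.Chars.endswith t [')'] = (PySem.Chars.pyGet? t (-1) == some ')') := by
      rw [Bool.eq_iff_iff, PySem.Chars.endswith_iff]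
      simp only [PySem.Chars.pyGet?_eq_listPyGet?, PySem.List.pyGet?_neg_one, beq_iff_eq]
      constructor
      · rintro ⟨u, rfl⟩; simp
      · intro hgl
        obtain ⟨l', rfl⟩ := List.getLast?_eq_some_iff.mp hgl
        exact ⟨l', rfl⟩
    rw [hsw, hew]
  · simp [hlen]

-- allPairsB agrees with A's length-check-then-indexed-scan, given pointwise agreement
theorem allPairsB_eq (xs : List (List Char)) : ∀ ys : List (List Char),
    (∀ x ∈ xs, ∀ y ∈ ys, checkTypeA x y = checkTypeB x y) →
    allPairsB xs ys =
      (if xs.length == ys.length then (xs.zip ys).all (fun p => checkTypeA p.1 p.2)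
       else false) := by
  induction xs with
  | nil =>
    intro ys _
    cases ys <;> simp [allPairsB]
  | cons x xs ih =>
    intro ys hpt
    cases ys with
    | nil => simp [allPairsB]
    | cons y ys' =>
      rw [allPairsB]
      rw [ih ys' (fun a ha b hb => hpt a (List.mem_cons_of_mem _ ha) b (List.mem_cons_of_mem _ hb))]
      rw [← hpt x List.mem_cons_self y List.mem_cons_self]
      by_cases hl : xs.length = ys'.length
      · simp [hl]
      · simp [hl]

theorem ifchain (x c : Bool) :
    (if x = true then true else if c = true then true else false) = (x || c) := by
  cases x <;> cases c <;> simp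

theorem checkTypeA_or (l r : List Char) :
    checkTypeA l r = ((l == r) || (r == VoidC) || isCompListA l r || isCompTupleA l r) := by
  rw [checkTypeA]
  cases l == r <;> cases r == VoidC <;> cases isCompListA l r <;> cases isCompTupleA l r <;> simp

theorem ABeq (n : Nat) : ∀ l v : List Char, l.length + v.length ≤ n →
    isCompTupleA l v = isCompTupleB l v ∧ isCompListA l v = isCompListB l v ∧
      checkTypeA l v = checkTypeB l v := by
  induction n using Nat.strong_induction_on with
  | _ n IH =>
    intro l v hn
    have hIH : ∀ x y : List Char, x.length + y.length < n →
        isCompTupleA x y = isCompTupleB x y ∧ isCompListA x y = isCompListB x y ∧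
          checkTypeA x y = checkTypeB x y :=
      fun x y hxy => IH _ hxy x y le_rfl
    have hTup : isCompTupleA l v = isCompTupleB l v := by
      rw [isCompTupleA, isCompTupleB]
      by_cases hg : (isTupleC l && isTupleC v) = true
      · have hgB : (isTupleB l && isTupleB v) = true := by
          rw [isTupleB_eq, isTupleB_eq]; exact hg
        rw [dif_pos hg, dif_pos hgB]
        dsimp only
        have hg2 : isTupleC l = true ∧ isTupleC v = true := by simpa using hg
        have h1 := isTupleC_length hg2.1
        have h2 := isTupleC_length hg2.2
        have hinC : ∀ t : List Char,
            PySem.Chars.slice (PySem.Chars.slice t (some 1) none) none (some (-1)) =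
              PySem.Chars.slice t (some 1) (some (-1)) := by
          intro t
          simp only [PySem.Chars.slice_eq_listSlice]
          rw [PySem.List.slice_from_one, PySem.List.slice_to_neg_one, innerSlice]
        rw [allPairsB_eq _ _ (fun x hx y hy => by
          have lx := mem_splitOn_length hx
          have ly := mem_splitOn_length hy
          rw [innerB_length] at lx ly
          exact (hIH x y (by omega)).2.2)]
        rw [attach_all _ (fun q => checkTypeA q.1 q.2), hinC, hinC]
      · have hgB : ¬ (isTupleB l && isTupleB v) = true := by
          rw [isTupleB_eq, isTupleB_eq]; exact hg
        rw [dif_neg hg, dif_neg hgB]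
    have hList : isCompListA l v = isCompListB l v := by
      rw [isCompListA, isCompListB]
      rw [depthB_eq, depthB_eq]
      by_cases hg : (isListC l && isListC v) = true
      · have hg2 : isListC l = true ∧ isListC v = true := by simpa using hg
        have hl2 := isListC_length hg2.1
        have hv2 := isListC_length hg2.2
        have hdl := dRec_le l
        have hdv := dRec_le v
        have hK : ¬ min (dRec l) (dRec v) = 0 := by
          have := (dRec_ne_zero_iff l).mpr hg2.1
          have := (dRec_ne_zero_iff v).mpr hg2.2
          omega
        rw [dif_pos hg, dif_neg hK]
        have hKl : 2 * min (dRec l) (dRec v) ≤ l.length := by omega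
        have hKv : 2 * min (dRec l) (dRec v) ≤ v.length := by omega
        have el : ((l.length : Int) - 2 * min (dRec l) (dRec v)) =
            ((l.length - 2 * min (dRec l) (dRec v) : Nat) : Int) := by omega
        have ev : ((v.length : Int) - 2 * min (dRec l) (dRec v)) =
            ((v.length - 2 * min (dRec l) (dRec v) : Nat) : Int) := by omega
        rw [el, ev]
        simp only [PySem.Chars.slice_eq_listSlice, PySem.List.slice_to_natCast]
        rw [stripA_eq]
        simp only [ifchain]
        have hct : checkTypeA (l.take (l.length - 2 * min (dRec l) (dRec v)))
              (v.take (v.length - 2 * min (dRec l) (dRec v))) =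
            checkTypeB (l.take (l.length - 2 * min (dRec l) (dRec v)))
              (v.take (v.length - 2 * min (dRec l) (dRec v))) := by
          refine (hIH _ _ ?_).2.2
          simp only [List.length_take]
          omega
        rw [hct]
      · have hK : min (dRec l) (dRec v) = 0 := by
          by_cases hl : isListC l = true
          · have hv : isListC v = false := by
              by_contra hc
              exact hg (by simp [hl, show isListC v = true by simpa using hc])
            have := dRec_eq_zero hv
            omega
          · have := dRec_eq_zero (show isListC l = false by simpa using hl)
            omega
        rw [dif_neg hg, dif_pos hK]
    have hCT : checkTypeA l v = checkTypeB l v := by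
      rw [checkTypeA_or, hList, hTup, checkTypeB]
    exact ⟨hTup, hList, hCT⟩

-- ===== VERDICT (by name: the statement is the Claim_ definition above) =====
theorem isCompList_spec : Claim_equal_isCompList := by
  intro l v _
  unfold Spec_isCompList isCompList isCompList_alt
  exact (ABeq (l.toList.length + v.toList.length) l.toList v.toList le_rfl).2.1
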